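-- pv_equiv track=rewrite | github.com/bluepostit/share-scraper | scraper/scraper/base.py | _get_brands_as_shares
-- ===== SOURCE A (Python) =====
-- def _get_brands_as_shares(brands):
--     shares = {}
--     for brand in brands:
--         if brand in shares:
--             shares[brand] += 1
--         else:
--             shares[brand] = 1
--     return shares
-- ===== SOURCE B (Python) =====
-- def _get_brands_as_shares(brands):
--     items = list(brands)
--     return {b: items.count(b) for b in dict.fromkeys(items)}
-- ===== Notes on version B (the rewrite author's own statement) =====
-- stated objective: alternative
-- what changed: Replaces A's single accumulating dict pass with a build-uniques-then-count strategy: materialize the input, dedup keys in first-occurrence order, then count each unique brand by rescanning the list.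
import Mathlib
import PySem

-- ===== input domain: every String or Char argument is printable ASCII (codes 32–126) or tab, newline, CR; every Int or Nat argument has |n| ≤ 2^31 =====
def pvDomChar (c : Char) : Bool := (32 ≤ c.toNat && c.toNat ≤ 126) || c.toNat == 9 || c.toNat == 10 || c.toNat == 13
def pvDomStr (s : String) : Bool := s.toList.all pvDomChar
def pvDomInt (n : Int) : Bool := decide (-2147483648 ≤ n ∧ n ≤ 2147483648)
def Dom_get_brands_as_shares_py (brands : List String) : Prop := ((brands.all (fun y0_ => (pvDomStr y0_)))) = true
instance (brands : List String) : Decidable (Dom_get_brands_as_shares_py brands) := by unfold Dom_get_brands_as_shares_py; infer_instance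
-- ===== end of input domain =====

-- B builds the result from the ordered uniques with a per-brand rescan instead of A's single accumulating dict pass (objective: alternative decomposition).
-- ===== PORT A =====
def get_brands_as_shares_py (brands : List String) : List (String × Int) :=
  (brands.foldl
    (fun shares brand =>
      if shares.contains brand then shares.modify brand 0 (· + 1)
      else shares.insert brand 1)
    PySem.Dict.empty).items

-- ===== PORT B =====
def get_brands_as_shares_py_alt (brands : List String) : List (String × Int) :=
  (PySem.List.dedup brands).map (fun b => (b, (brands.count b : Int)))

-- ===== PRECONDITION & SPEC =====
def Spec_get_brands_as_shares_py (brands : List String) (out : List (String × Int)) : Prop := out = get_brands_as_shares_py_alt brands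
instance (brands : List String) (out : List (String × Int)) : Decidable (Spec_get_brands_as_shares_py brands out) := by unfold Spec_get_brands_as_shares_py; infer_instance

-- ===== CLAIM (what is proved, stated in full; the proofs are below) =====
def Claim_equal_get_brands_as_shares_py : Prop := ∀ (brands : List String), Dom_get_brands_as_shares_py brands → Spec_get_brands_as_shares_py brands (get_brands_as_shares_py brands)

-- ===== LEMMAS AND PROOFS =====

-- modifying an absent key with default 0 and (·+1) is exactly inserting 1
theorem modify_absent (d : PySem.Dict String Int) (b : String) (h : d.contains b = false) :
    d.modify b 0 (· + 1) = d.insert b 1 := by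
  simp [PySem.Dict.modify, PySem.Dict.getD_of_not_contains d 0 h]

-- A's loop body coincides with the Counter loop body, so A's fold is the counter
theorem loop_eq_counter (brands : List String) :
    brands.foldl
      (fun shares brand =>
        if shares.contains brand then shares.modify brand 0 (· + 1)
        else shares.insert brand 1)
      PySem.Dict.empty = PySem.Dict.counter brands := by
  rw [PySem.Dict.counter_eq_foldl]
  congr 1
  funext d b
  by_cases hc : d.contains b = true
  · simp [hc]
  · simp [Bool.not_eq_true] at hc
    simp [hc, modify_absent d b hc]

-- ===== VERDICT (by name: the statement is the Claim_ definition above) =====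
theorem get_brands_as_shares_py_spec : Claim_equal_get_brands_as_shares_py := by
  intro brands _
  unfold Spec_get_brands_as_shares_py get_brands_as_shares_py get_brands_as_shares_py_alt
  rw [loop_eq_counter brands, PySem.Dict.items_counter]
  simp [PySem.List.dedup_eq_ofList]
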